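-- pv_equiv track=rewrite | github.com/tmaringgele/optimal-experiments-for-partial-ID | lib/autobound_pkg/build/lib/autobound/Query.py | clean_query
-- ===== SOURCE A (Python) =====
-- def remove_one(part):
--     """ To be used inside clean_query(lst)
--     If the second part of a query is a list with more than 1 element
--     and contains '1', this element must me removed
--     """
--     if len(part) > 1:
--         return [ k for k in part if k != '1' ]
--     else:
--         return part
--
-- def clean_query(lst):
--     """ This method sorts and removes duplicated and zero parameters
--     """
--     lst = [ (x[0], sorted1(x[1])) for x in lst.copy() ]
--     duplicated = [ x[1]  # Removing duplicated
--             for n, x in enumerate(lst)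
--             if x[1] not in [ i[1] for i in lst[:n] ] ]
--     lst = [ (sum([ i[0]
--         for i in lst if x == i[1] ]), x)
--             for x in duplicated ]
--     lst = [ (x[0], remove_one(x[1]) ) for x in lst if x[0] != 0 ]
--     return lst
--
-- def sorted1(list1):
--     list1.sort()
--     return list1
-- ===== SOURCE B (Python) =====
-- def remove_one(part):
--     if len(part) > 1:
--         return [k for k in part if k != '1']
--     else:
--         return part
--
-- def clean_query(lst):
--     """One pass: aggregate coefficient sums in a dict keyed by the sorted part
--     (insertion order = first-occurrence order), then drop zero sums.
--     Note: unlike A, this does not sort the inner lists of lst in place."""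
--     sums = {}
--     for coef, part in lst:
--         key = tuple(sorted(part))
--         sums[key] = sums.get(key, 0) + coef
--     return [(s, remove_one(list(k))) for k, s in sums.items() if s != 0]
-- ===== Notes on version B (the rewrite author's own statement) =====
-- stated objective: alternative
-- what changed: Replaces A's quadratic passes (prefix-membership dedup plus a full re-scan sum per distinct key) with a single pass aggregating coefficient sums in a dict keyed by the sorted part, then filtering zero sums (intended as faster, but a timing run measured only 1.42x at the largest size, below the 1.5x bar); B also does not mutate the inner lists in place as A's sorted1 does.
import Mathlib
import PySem

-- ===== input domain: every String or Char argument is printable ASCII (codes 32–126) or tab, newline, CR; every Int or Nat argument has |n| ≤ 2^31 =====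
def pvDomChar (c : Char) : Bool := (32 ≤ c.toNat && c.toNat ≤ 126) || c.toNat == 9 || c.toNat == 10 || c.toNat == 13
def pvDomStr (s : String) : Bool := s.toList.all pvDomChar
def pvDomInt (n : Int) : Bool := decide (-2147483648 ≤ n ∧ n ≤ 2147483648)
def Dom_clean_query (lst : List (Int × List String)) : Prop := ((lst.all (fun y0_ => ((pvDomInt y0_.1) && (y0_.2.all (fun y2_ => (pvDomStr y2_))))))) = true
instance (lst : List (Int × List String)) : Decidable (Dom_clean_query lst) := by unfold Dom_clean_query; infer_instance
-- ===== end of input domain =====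

-- B replaces A's quadratic dedup/re-scan passes by one dict-aggregating pass; equivalence is about
-- the RETURN value only: A sorts the inner lists of lst in place (sorted1), B does not mutate lst.


-- ===== PORT A =====
def remove_one (part : List String) : List String :=
  if part.length > 1 then part.filter (fun k => !(k == "1")) else part

def sorted1 (list1 : List String) : List String :=
  PySem.List.sorted list1 (fun s => s) false

def clean_query (lst : List (Int × List String)) : List (Int × List String) :=
  let lst1 := lst.map (fun x => (x.1, sorted1 x.2))
  let duplicated := (PySem.List.enumerate lst1).filterMap
    (fun nx => if nx.2.2 ∈ (lst1.take nx.1.toNat).map (fun i => i.2) then none else some nx.2.2)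
  let lst2 := duplicated.map (fun x =>
    (((lst1.filter (fun i => x == i.2)).map (fun i => i.1)).sum, x))
  (lst2.filter (fun x => !(x.1 == 0))).map (fun x => (x.1, remove_one x.2))

-- ===== PORT B =====
-- Python B's tuple keys are modeled as List String (tuple of like components = list).
def clean_query_alt (lst : List (Int × List String)) : List (Int × List String) :=
  let sums := lst.foldl
    (fun d x =>
      let key := PySem.List.sorted x.2 (fun s => s) false
      d.insert key (d.getD key 0 + x.1))
    (PySem.Dict.empty : PySem.Dict (List String) Int)
  (sums.items.filter (fun p => !(p.2 == 0))).map (fun p => (p.2, remove_one p.1))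

-- ===== PRECONDITION & SPEC =====
def Spec_clean_query (lst : List (Int × List String)) (out : List (Int × List String)) : Prop := out = clean_query_alt lst
instance (lst : List (Int × List String)) (out : List (Int × List String)) : Decidable (Spec_clean_query lst out) := by unfold Spec_clean_query; infer_instance

-- ===== CLAIM (what is proved, stated in full; the proofs are below) =====
def Claim_equal_clean_query : Prop := ∀ (lst : List (Int × List String)), Dom_clean_query lst → Spec_clean_query lst (clean_query lst)

-- ===== LEMMAS AND PROOFS =====

-- A's prefix-membership comprehension is first-occurrence dedup of the keys.
theorem duplicated_eq_ofList (ys : List (Int × List String)) :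
    (PySem.List.enumerate ys).filterMap
      (fun nx => if nx.2.2 ∈ (ys.take nx.1.toNat).map (fun i => i.2) then none else some nx.2.2)
    = PySem.Set.ofList (ys.map (fun i => i.2)) := by
  induction ys using List.reverseRecOn with
  | nil => simp [PySem.List.enumerate]
  | append_singleton t y ih =>
    rw [PySem.List.enumerate_append, List.filterMap_append]
    have h1 : (PySem.List.enumerate t 0).filterMap
        (fun nx => if nx.2.2 ∈ ((t ++ [y]).take nx.1.toNat).map (fun i => i.2) then none else some nx.2.2)
      = (PySem.List.enumerate t 0).filterMap
        (fun nx => if nx.2.2 ∈ (t.take nx.1.toNat).map (fun i => i.2) then none else some nx.2.2) := by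
      apply List.filterMap_congr
      intro nx hnx
      rcases (PySem.List.mem_enumerate_iff t 0 nx).1 hnx with ⟨k, hk, rfl⟩
      have hkk : ((0 : Int) + (k : Int)).toNat = k := by omega
      simp only [hkk]
      rw [List.take_append_of_le_length (by omega)]
    rw [h1, ih]
    have h2 : (PySem.List.enumerate [y] (0 + t.length)).filterMap
        (fun nx => if nx.2.2 ∈ ((t ++ [y]).take nx.1.toNat).map (fun i => i.2) then none else some nx.2.2)
      = if y.2 ∈ t.map (fun i => i.2) then [] else [y.2] := by
      simp only [PySem.List.enumerate_cons, PySem.List.enumerate_nil, List.filterMap]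
      have h3 : ((0 : Int) + (t.length : Int)).toNat = t.length := by omega
      rw [h3, List.take_append_of_le_length (le_refl _), List.take_length]
      split_ifs <;> rfl
    rw [h2, List.map_append]
    simp only [List.map_cons, List.map_nil]
    rw [PySem.Set.ofList_append_singleton, PySem.Set.add_eq_ite]
    by_cases hm : y.2 ∈ t.map (fun i => i.2)
    · simp [hm, PySem.Set.mem_ofList]
    · simp [hm, PySem.Set.mem_ofList]

-- The dict fold's value at any key is the sum of the matching coefficients.
theorem getD_fold (ys : List (Int × List String)) (d : PySem.Dict (List String) Int) (k : List String) :
    (ys.foldl (fun d x => d.insert x.2 (d.getD x.2 0 + x.1)) d).getD k 0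
    = d.getD k 0 + ((ys.filter (fun i => k == i.2)).map (fun i => i.1)).sum := by
  induction ys generalizing d with
  | nil => simp
  | cons y t ih =>
    simp only [List.foldl_cons, ih, List.filter_cons]
    rw [PySem.Dict.getD_insert]
    by_cases h : k = y.2
    · simp [h]; ring
    · simp [h, beq_iff_eq]

-- The dict fold's items: first-occurrence keys paired with their sums.
theorem items_fold (ys : List (Int × List String)) :
    (ys.foldl (fun d x => d.insert x.2 (d.getD x.2 0 + x.1))
      (PySem.Dict.empty : PySem.Dict (List String) Int)).items
    = (PySem.Set.ofList (ys.map (fun i => i.2))).map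
        (fun k => (k, ((ys.filter (fun i => k == i.2)).map (fun i => i.1)).sum)) := by
  have hkeys : (ys.foldl (fun d x => d.insert x.2 (d.getD x.2 0 + x.1))
      (PySem.Dict.empty : PySem.Dict (List String) Int)).keys
      = PySem.Set.ofList (ys.map (fun i => i.2)) := by
    rw [PySem.Dict.keys_foldl_insert_key ys (fun i => i.2)
      (fun d x => d.getD x.2 0 + x.1) PySem.Dict.empty]
    simp [PySem.Dict.keys_empty, PySem.Set.update_nil_left]
  have hnd : (ys.foldl (fun d x => d.insert x.2 (d.getD x.2 0 + x.1))
      (PySem.Dict.empty : PySem.Dict (List String) Int)).keys.Nodup := by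
    rw [hkeys]; exact PySem.Set.nodup_ofList _
  rw [PySem.Dict.items_eq_map_keys _ hnd 0, hkeys]
  apply List.map_congr_left
  intro k _
  rw [getD_fold]
  simp

-- ===== VERDICT (by name: the statement is the Claim_ definition above) =====
theorem clean_query_spec : Claim_equal_clean_query := by
  intro lst _
  unfold Spec_clean_query clean_query clean_query_alt
  have hfold : lst.foldl
      (fun d x =>
        let key := PySem.List.sorted x.2 (fun s => s) false
        d.insert key (d.getD key 0 + x.1))
      (PySem.Dict.empty : PySem.Dict (List String) Int)
    = (lst.map (fun x => (x.1, sorted1 x.2))).foldl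
        (fun d x => d.insert x.2 (d.getD x.2 0 + x.1)) PySem.Dict.empty := by
    rw [List.foldl_map]
    rfl
  simp only [hfold, items_fold, duplicated_eq_ofList, List.filter_map, List.map_map]
  rfl
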